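-- pv_equiv track=rewrite | github.com/official-Auralin/Benchmark-game | gf01/renderers/r1_pygame_helpers.py | _summarize_visible_ap_groups
-- ===== SOURCE A (Python) =====
-- from collections import OrderedDict, defaultdict
--
-- def _ap_group_key(ap: str) -> str:
--     token = str(ap).strip()
--     if not token:
--         return "unknown"
--     prefix_chars: list[str] = []
--     for ch in token:
--         if ch.isdigit():
--             break
--         prefix_chars.append(ch)
--     prefix = "".join(prefix_chars).strip("_-")
--     if prefix:
--         return prefix
--     if "_" in token:
--         head = token.split("_", 1)[0].strip()
--         if head:
--             return head
--     return token
--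
-- def _summarize_visible_ap_groups(visible_aps: list[str]) -> str:
--     if not visible_aps:
--         return "groups: (none)"
--     grouped: dict[str, int] = defaultdict(int)
--     for ap in visible_aps:
--         grouped[_ap_group_key(ap)] += 1
--     parts = [f"{k}({grouped[k]})" for k in sorted(grouped)]
--     return "groups: " + ", ".join(parts)
-- ===== SOURCE B (Python) =====
-- def _ap_group_key(ap: str) -> str:
--     token = str(ap).strip()
--     if not token:
--         return "unknown"
--     prefix_chars: list[str] = []
--     for ch in token:
--         if ch.isdigit():
--             break
--         prefix_chars.append(ch)
--     prefix = "".join(prefix_chars).strip("_-")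
--     if prefix:
--         return prefix
--     if "_" in token:
--         head = token.split("_", 1)[0].strip()
--         if head:
--             return head
--     return token
--
--
-- def _summarize_visible_ap_groups(visible_aps: list[str]) -> str:
--     # sort ALL keys, then group adjacent equal runs (no dict of counts)
--     if not visible_aps:
--         return "groups: (none)"
--     keys = sorted(_ap_group_key(ap) for ap in visible_aps)
--     parts = []
--     i = 0
--     n = len(keys)
--     while i < n:
--         j = i + 1
--         while j < n and keys[j] == keys[i]:
--             j += 1
--         parts.append(f"{keys[i]}({j - i})")
--         i = j
--     return "groups: " + ", ".join(parts)
-- ===== Notes on version B (the rewrite author's own statement) =====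
-- stated objective: alternative
-- what changed: Replaces the dict-count-then-sort-distinct-keys strategy by sorting all group keys and counting adjacent equal runs in one scan; no counting dict is built.
import Mathlib
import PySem

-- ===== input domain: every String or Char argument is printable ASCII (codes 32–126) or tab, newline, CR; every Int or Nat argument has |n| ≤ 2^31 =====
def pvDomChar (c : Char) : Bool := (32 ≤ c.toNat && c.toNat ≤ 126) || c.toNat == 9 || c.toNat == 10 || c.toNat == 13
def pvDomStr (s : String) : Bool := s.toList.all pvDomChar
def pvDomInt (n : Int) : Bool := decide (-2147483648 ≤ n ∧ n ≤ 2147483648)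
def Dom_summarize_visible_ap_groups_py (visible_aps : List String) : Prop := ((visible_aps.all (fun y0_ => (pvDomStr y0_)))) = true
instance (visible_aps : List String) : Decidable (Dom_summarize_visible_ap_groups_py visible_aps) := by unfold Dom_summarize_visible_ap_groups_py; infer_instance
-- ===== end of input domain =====

-- B changes the grouping strategy only (sort all keys, count adjacent runs); same result, similar cost.

-- ===== PORT A =====
-- shared helper _ap_group_key (identical in A and B): the break-loop is the recursion prefixChars
def prefixChars : List Char → List Char
  | [] => []
  | ch :: rest => if PySem.Chars.strIsdigit [ch] then [] else ch :: prefixChars rest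

def ap_group_key (ap : String) : String :=
  let token := PySem.Chars.strip ap.toList
  if token = [] then "unknown"
  else
    let pfx := PySem.Chars.stripChars (prefixChars token) ['_', '-']
    if pfx ≠ [] then String.ofList pfx
    else if PySem.Chars.isIn ['_'] token then
      let head := PySem.Chars.strip ((PySem.Chars.splitOnMax token ['_'] 1).headD [])
      if head ≠ [] then String.ofList head else String.ofList token
    else String.ofList token

def summarize_visible_ap_groups_py (visible_aps : List String) : String :=
  if visible_aps = [] then "groups: (none)"
  else
    let grouped := visible_aps.foldl
      (fun d ap => d.modify (ap_group_key ap) 0 (· + 1)) (PySem.Dict.empty : PySem.Dict String Int)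
    let parts := (PySem.List.sorted grouped.keys (fun k => k) false).map
      (fun k => k ++ "(" ++ PySem.Int.toStr (grouped.getD k 0) ++ ")")
    "groups: " ++ PySem.Str.join ", " parts

-- ===== PORT B =====
-- the while-loop over sorted keys: emit (key, run length), continue after the run
def groupRuns : List String → List (String × Int)
  | [] => []
  | x :: xs => (x, 1 + (xs.takeWhile (· == x)).length) :: groupRuns (xs.dropWhile (· == x))
  termination_by l => l.length
  decreasing_by simpa using Nat.lt_succ_of_le (List.length_dropWhile_le _ _)

def summarize_visible_ap_groups_py_alt (visible_aps : List String) : String :=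
  if visible_aps = [] then "groups: (none)"
  else
    let keys := PySem.List.sorted (visible_aps.map ap_group_key) (fun k => k) false
    let parts := (groupRuns keys).map
      (fun kc => kc.1 ++ "(" ++ PySem.Int.toStr kc.2 ++ ")")
    "groups: " ++ PySem.Str.join ", " parts

-- ===== PRECONDITION & SPEC =====
def Spec_summarize_visible_ap_groups_py (visible_aps : List String) (out : String) : Prop := out = summarize_visible_ap_groups_py_alt visible_aps
instance (visible_aps : List String) (out : String) : Decidable (Spec_summarize_visible_ap_groups_py visible_aps out) := by unfold Spec_summarize_visible_ap_groups_py; infer_instance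

-- ===== CLAIM (what is proved, stated in full; the proofs are below) =====
def Claim_equal_summarize_visible_ap_groups_py : Prop := ∀ (visible_aps : List String), Dom_summarize_visible_ap_groups_py visible_aps → Spec_summarize_visible_ap_groups_py visible_aps (summarize_visible_ap_groups_py visible_aps)

-- ===== LEMMAS AND PROOFS =====

theorem lt_of_mem_dropWhile_of_sorted {x : String} {xs : List String}
    (h : xs.Pairwise (· ≤ ·)) (hx : ∀ c ∈ xs, x ≤ c) :
    ∀ c ∈ xs.dropWhile (· == x), x < c := by
  induction xs with
  | nil => simp
  | cons y ys ih =>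
    by_cases hy : ((fun c => c == x) y) = true
    · rw [List.dropWhile_cons]
      simp only [hy, if_true]
      exact ih h.tail (fun c hc => hx c (List.mem_cons_of_mem _ hc))
    · rw [List.dropWhile_cons]
      simp only [hy]
      intro c hc
      have hyx : y ≠ x := by simpa using hy
      have hxy : x < y := lt_of_le_of_ne (hx y (List.mem_cons_self)) (Ne.symm hyx)
      rcases List.mem_cons.mp hc with rfl | hc
      · exact hxy
      · exact lt_of_lt_of_le hxy (List.rel_of_pairwise_cons h hc)

theorem groupRuns_spec (m : List String) (h : m.Pairwise (· ≤ ·)) :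
    ((groupRuns m).map Prod.fst).Pairwise (· < ·) ∧
    (∀ k, k ∈ (groupRuns m).map Prod.fst ↔ k ∈ m) ∧
    groupRuns m = ((groupRuns m).map Prod.fst).map (fun k => (k, (m.count k : Int))) := by
  induction m using groupRuns.induct with
  | case1 => simp [groupRuns]
  | case2 x xs ih =>
    have hxall : ∀ c ∈ xs, x ≤ c := fun c hc => List.rel_of_pairwise_cons h hc
    have hr : (xs.dropWhile (· == x)).Pairwise (· ≤ ·) :=
      h.tail.sublist (List.dropWhile_sublist _)
    have hlt : ∀ c ∈ xs.dropWhile (· == x), x < c :=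
      lt_of_mem_dropWhile_of_sorted h.tail hxall
    obtain ⟨ih1, ih2, ih3⟩ := ih hr
    have htx : ∀ c ∈ xs.takeWhile (· == x), c = x := fun c hc => by
      simpa using List.mem_takeWhile_imp hc
    have hsplit : xs = xs.takeWhile (· == x) ++ xs.dropWhile (· == x) :=
      (List.takeWhile_append_dropWhile).symm
    have hxscount : ∀ k, xs.count k =
        (xs.takeWhile (· == x)).count k + (xs.dropWhile (· == x)).count k := by
      intro k
      conv_lhs => rw [hsplit]
      exact List.count_append ..
    have hcx : (x :: xs).count x = (xs.takeWhile (· == x)).length + 1 := by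
      have h1 : (xs.takeWhile (· == x)).count x = (xs.takeWhile (· == x)).length :=
        List.count_eq_length.mpr (fun c hc => by simp [htx c hc])
      have h2 : (xs.dropWhile (· == x)).count x = 0 :=
        List.count_eq_zero.mpr (fun hc => absurd (hlt x hc) (lt_irrefl x))
      have := hxscount x
      simp only [List.count_cons_self]
      omega
    have hck : ∀ k ∈ xs.dropWhile (· == x), (x :: xs).count k = (xs.dropWhile (· == x)).count k := by
      intro k hk
      have hkx : k ≠ x := fun e => absurd (hlt k hk) (by simp [e])
      have h3 : (xs.takeWhile (· == x)).count k = 0 :=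
        List.count_eq_zero.mpr (fun hc => hkx (htx k hc))
      have := hxscount k
      simp only [List.count_cons, beq_iff_eq, Ne.symm hkx, if_false]
      omega
    refine ⟨?_, ?_, ?_⟩
    · rw [groupRuns]
      simp only [List.map_cons, List.pairwise_cons]
      exact ⟨fun k hk => hlt k ((ih2 k).mp hk), ih1⟩
    · intro k
      rw [groupRuns]
      simp only [List.map_cons, List.mem_cons, ih2]
      constructor
      · rintro (rfl | hk)
        · exact .inl rfl
        · exact .inr ((List.dropWhile_sublist _).mem hk)
      · rintro (rfl | hk)
        · exact .inl rfl
        · rw [hsplit] at hk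
          rcases List.mem_append.mp hk with hk | hk
          · exact .inl (htx k hk)
          · exact .inr hk
    · rw [groupRuns]
      simp only [List.map_cons]
      refine congrArg₂ _ ?_ ?_
      · have : ((x :: xs).count x : Int) = 1 + ((xs.takeWhile (· == x)).length : Int) := by
          rw [hcx]; push_cast; ring
        rw [this]
      · calc groupRuns (xs.dropWhile (· == x))
            = ((groupRuns (xs.dropWhile (· == x))).map Prod.fst).map
                (fun k => (k, ((xs.dropWhile (· == x)).count k : Int))) := ih3
          _ = ((groupRuns (xs.dropWhile (· == x))).map Prod.fst).map
                (fun k => (k, ((x :: xs).count k : Int))) :=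
              List.map_congr_left (fun k hk => by rw [hck k ((ih2 k).mp hk)])

theorem main_parts (ks : List String) :
    (PySem.List.sorted (PySem.Set.ofList ks) (fun k => k) false).map
      (fun k => (k, (ks.count k : Int)))
    = groupRuns (PySem.List.sorted ks (fun k => k) false) := by
  set m := PySem.List.sorted ks (fun k => k) false with hm
  have hpw : m.Pairwise (· ≤ ·) := by
    simpa using PySem.List.sorted_pairwise ks (fun k => k)
  have hperm : m.Perm ks := PySem.List.sorted_perm ks (fun k => k) false
  obtain ⟨h1, h2, h3⟩ := groupRuns_spec m hpw
  have hnd1 : ((groupRuns m).map Prod.fst).Nodup := h1.imp ne_of_lt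
  have hps : ((groupRuns m).map Prod.fst).Perm (PySem.Set.ofList ks) := by
    refine (List.perm_ext_iff_of_nodup hnd1 (PySem.Set.nodup_ofList ks)).mpr ?_
    intro k
    rw [h2, PySem.Set.mem_ofList, hperm.mem_iff]
  have hsort : PySem.List.sorted (PySem.Set.ofList ks) (fun k => k) false
      = (groupRuns m).map Prod.fst :=
    PySem.List.sorted_eq_of_perm_of_pairwise_lt _ _ _ hps (by exact h1)
  rw [hsort]
  calc ((groupRuns m).map Prod.fst).map (fun k => (k, (ks.count k : Int)))
      = ((groupRuns m).map Prod.fst).map (fun k => (k, (m.count k : Int))) :=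
        List.map_congr_left (fun k _ => by rw [hperm.count_eq])
    _ = groupRuns m := h3.symm

-- ===== VERDICT (by name: the statement is the Claim_ definition above) =====
theorem summarize_visible_ap_groups_py_spec : Claim_equal_summarize_visible_ap_groups_py := by
  intro l _
  unfold Spec_summarize_visible_ap_groups_py summarize_visible_ap_groups_py summarize_visible_ap_groups_py_alt
  by_cases hl : l = []
  · simp [hl]
  · simp only [if_neg hl]
    have hfold : l.foldl (fun d ap => d.modify (ap_group_key ap) 0 (· + 1))
          (PySem.Dict.empty : PySem.Dict String Int)
        = PySem.Dict.counter (l.map ap_group_key) := by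
      rw [PySem.Dict.counter_eq_foldl, List.foldl_map]
    simp only [hfold, PySem.Dict.keys_counter, PySem.Dict.getD_counter]
    rw [← main_parts (l.map ap_group_key), List.map_map]
    rfl
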